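-- pv_equiv track=rewrite | github.com/Lovepreet013/python | Data Structures/List/challenges.py | rearrange_positive_negative
-- ===== SOURCE A (Python) =====
-- def rearrange_positive_negative(lst):
--     neg = []
--     pos = []
--
--     #Make a list of negative and positive values
--     for i in lst:
--         if i < 0:
--             neg.append(i)
--         else :
--             pos.append(i)
--
--     return neg + pos
-- ===== SOURCE B (Python) =====
-- def rearrange_positive_negative(lst):
--     return sorted(lst, key=lambda x: 0 if x < 0 else 1)
-- ===== Notes on version B (the rewrite author's own statement) =====
-- stated objective: idiomatic
-- what changed: Replaces the two-accumulator partition loop with a single stable sort keyed on the sign predicate (negatives get key 0, non-negatives key 1); stability preserves relative order within each group.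
import Mathlib
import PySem

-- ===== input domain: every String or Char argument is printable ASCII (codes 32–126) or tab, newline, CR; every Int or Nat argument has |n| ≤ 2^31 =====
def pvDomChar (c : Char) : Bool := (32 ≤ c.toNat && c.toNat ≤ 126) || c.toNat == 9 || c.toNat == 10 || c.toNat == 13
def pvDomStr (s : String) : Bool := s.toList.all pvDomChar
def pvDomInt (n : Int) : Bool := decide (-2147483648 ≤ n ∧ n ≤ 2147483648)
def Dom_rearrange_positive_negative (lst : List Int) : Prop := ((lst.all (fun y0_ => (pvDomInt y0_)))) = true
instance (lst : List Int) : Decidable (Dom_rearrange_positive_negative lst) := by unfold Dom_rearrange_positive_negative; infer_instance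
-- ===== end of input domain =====

-- B replaces A's two-accumulator partition loop by one stable sort keyed on the sign predicate (idiomatic; not faster).

-- ===== PORT A =====
-- the loop appending to neg/pos, then neg + pos
def rearrange_positive_negative (lst : List Int) : List Int :=
  let s := lst.foldl (fun (acc : List Int × List Int) i =>
    if i < 0 then (acc.1 ++ [i], acc.2) else (acc.1, acc.2 ++ [i])) ([], [])
  s.1 ++ s.2

-- ===== PORT B =====
-- sorted(lst, key=lambda x: 0 if x < 0 else 1)
def rearrange_positive_negative_alt (lst : List Int) : List Int :=
  PySem.List.sorted lst (fun x => if x < 0 then (0 : Int) else 1)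

-- ===== PRECONDITION & SPEC =====
def Spec_rearrange_positive_negative (lst : List Int) (out : List Int) : Prop := out = rearrange_positive_negative_alt lst
instance (lst : List Int) (out : List Int) : Decidable (Spec_rearrange_positive_negative lst out) := by unfold Spec_rearrange_positive_negative; infer_instance

-- ===== CLAIM (what is proved, stated in full; the proofs are below) =====
def Claim_equal_rearrange_positive_negative : Prop := ∀ (lst : List Int), Dom_rearrange_positive_negative lst → Spec_rearrange_positive_negative lst (rearrange_positive_negative lst)

-- ===== LEMMAS AND PROOFS =====

def pvKey : Int → Int := fun x => if x < 0 then 0 else 1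

def pvIns : Int → List Int → List Int :=
  PySem.List.insertBy (fun a b => decide (pvKey a < pvKey b))

theorem pvIns_neg (x : Int) (hx : x < 0) :
    ∀ (n p : List Int), (∀ a ∈ n, a < 0) → (∀ a ∈ p, ¬ a < 0) →
    pvIns x (n ++ p) = n ++ x :: p := by
  intro n
  induction n with
  | nil =>
    intro p _ hp
    cases p with
    | nil => rfl
    | cons y ys =>
      have hy : ¬ y < 0 := hp y (by simp)
      simp [pvIns, PySem.List.insertBy, pvKey, hx, hy]
  | cons a n' ih =>
    intro p hn hp
    have ha : a < 0 := hn a (by simp)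
    have : pvIns x (a :: (n' ++ p)) = a :: pvIns x (n' ++ p) := by
      simp [pvIns, PySem.List.insertBy, pvKey, hx, ha]
    simpa [this] using congrArg (a :: ·) (ih p (fun b hb => hn b (by simp [hb])) hp)

theorem pvIns_nonneg (x : Int) (hx : ¬ x < 0) :
    ∀ (l : List Int), pvIns x l = l ++ [x] := by
  intro l
  induction l with
  | nil => rfl
  | cons y ys ih =>
    have : ¬ (pvKey x < pvKey y) := by
      simp only [pvKey, if_neg hx]
      split_ifs <;> omega
    simp [pvIns, PySem.List.insertBy, this] at ih ⊢
    exact ih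

theorem pvB_inv (lst : List Int) :
    ∀ (n p : List Int), (∀ a ∈ n, a < 0) → (∀ a ∈ p, ¬ a < 0) →
    lst.foldl (fun acc x => pvIns x acc) (n ++ p)
      = (n ++ lst.filter (fun i => decide (i < 0))) ++ (p ++ lst.filter (fun i => !decide (i < 0))) := by
  induction lst with
  | nil => intro n p _ _; simp
  | cons x xs ih =>
    intro n p hn hp
    by_cases hx : x < 0
    · have h1 : pvIns x (n ++ p) = (n ++ [x]) ++ p := by
        simpa using pvIns_neg x hx n p hn hp
      have h2 := ih (n ++ [x]) p
        (by intro a ha; rcases List.mem_append.mp ha with h | h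
            · exact hn a h
            · simp at h; omega) hp
      simp only [List.foldl_cons, h1, h2]
      simp [hx]
    · have h1 : pvIns x (n ++ p) = n ++ (p ++ [x]) := by
        simpa using pvIns_nonneg x hx (n ++ p)
      have h2 := ih n (p ++ [x]) hn
        (by intro a ha; rcases List.mem_append.mp ha with h | h
            · exact hp a h
            · simp at h; omega)
      simp only [List.foldl_cons, h1, h2]
      simp [hx]

theorem pvA_inv (lst : List Int) :
    ∀ (n p : List Int),
    lst.foldl (fun (acc : List Int × List Int) i =>
      if i < 0 then (acc.1 ++ [i], acc.2) else (acc.1, acc.2 ++ [i])) (n, p)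
      = (n ++ lst.filter (fun i => decide (i < 0)), p ++ lst.filter (fun i => !decide (i < 0))) := by
  induction lst with
  | nil => intro n p; simp
  | cons x xs ih =>
    intro n p
    by_cases hx : x < 0 <;> simp [hx, ih]

-- ===== VERDICT (by name: the statement is the Claim_ definition above) =====
theorem rearrange_positive_negative_spec : Claim_equal_rearrange_positive_negative := by
  intro lst _
  unfold Spec_rearrange_positive_negative rearrange_positive_negative rearrange_positive_negative_alt
  have hB := PySem.List.sorted_eq_foldl_insertBy lst pvKey
  have hB2 := pvB_inv lst [] [] (by simp) (by simp)
  simp only [List.nil_append] at hB2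
  have : PySem.List.sorted lst pvKey
      = lst.filter (fun i => decide (i < 0)) ++ lst.filter (fun i => !decide (i < 0)) := by
    rw [hB]; exact hB2
  rw [show (fun x => if x < 0 then (0 : Int) else 1) = pvKey from rfl, this, pvA_inv lst [] []]
  simp
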